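-- pv_equiv track=rewrite | github.com/mazim-lab/churningcanada | scrapers/parsers/canadian_banks.py | parse_bmo_business
-- ===== SOURCE A (Python) =====
-- def parse_bmo_business(text: str) -> list[dict]:
--     """Parse BMO business cards (Firefox required, simple page)."""
--     cards = []
--     lines = [l.strip() for l in text.split("\n") if l.strip()]
--     for i, line in enumerate(lines):
--         if ("BMO" in line or "CashBack" in line) and ("Mastercard" in line or "Visa" in line) and len(line) < 80:
--             card = {"name": line, "type": "business"}
--             for j in range(i, min(i + 20, len(lines))):
--                 if "Annual fee" in lines[j] or "annual fee" in lines[j].lower():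
--                     # Fee is on previous line with $
--                     k = j - 1
--                     while k >= i:
--                         if "$" in lines[k]:
--                             card["annual_fee"] = lines[k]
--                             break
--                         k -= 1
--                     break
--             for j in range(i, min(i + 15, len(lines))):
--                 if "Welcome offer:" in lines[j]:
--                     card["welcome_bonus"] = lines[j].replace("Welcome offer:", "").strip()
--                     break
--             for j in range(i, min(i + 15, len(lines))):
--                 if "On purchases" in lines[j] and j > 0:
--                     card["interest_purchases"] = lines[j - 1]
--                     break
--             cards.append(card)
--     return cards
-- ===== SOURCE B (Python) =====
-- def parse_bmo_business(text: str) -> list[dict]: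
--     """Parse BMO business cards: one forward window scan per card instead of three."""
--     cards = []
--     lines = [l.strip() for l in text.split("\n") if l.strip()]
--     n = len(lines)
--     for i, line in enumerate(lines):
--         if ("BMO" in line or "CashBack" in line) and ("Mastercard" in line or "Visa" in line) and len(line) < 80:
--             fee = bonus = interest = None
--             fee_done = False
--             last_dollar = None
--             for j in range(i, min(i + 20, n)):
--                 lj = lines[j]
--                 if not fee_done and "annual fee" in lj.lower():
--                     fee = last_dollar
--                     fee_done = True
--                 if "$" in lj:
--                     last_dollar = lj
--                 if j < i + 15:
--                     if bonus is None and "Welcome offer:" in lj: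
--                         bonus = lj.replace("Welcome offer:", "").strip()
--                     if interest is None and "On purchases" in lj and j > 0:
--                         interest = lines[j - 1]
--             card = {"name": line, "type": "business"}
--             if fee is not None:
--                 card["annual_fee"] = fee
--             if bonus is not None:
--                 card["welcome_bonus"] = bonus
--             if interest is not None:
--                 card["interest_purchases"] = interest
--             cards.append(card)
--     return cards
-- ===== Notes on version B (the rewrite author's own statement) =====
-- stated objective: alternative
-- what changed: A's three separate windowed scans per card (including a backward while-loop hunting for the most recent dollar line) are replaced by a single forward pass over the 20-line window that tracks the last dollar line and fills each of the three optional fields at its first match, assembling the dict afterwards.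
import Mathlib
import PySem

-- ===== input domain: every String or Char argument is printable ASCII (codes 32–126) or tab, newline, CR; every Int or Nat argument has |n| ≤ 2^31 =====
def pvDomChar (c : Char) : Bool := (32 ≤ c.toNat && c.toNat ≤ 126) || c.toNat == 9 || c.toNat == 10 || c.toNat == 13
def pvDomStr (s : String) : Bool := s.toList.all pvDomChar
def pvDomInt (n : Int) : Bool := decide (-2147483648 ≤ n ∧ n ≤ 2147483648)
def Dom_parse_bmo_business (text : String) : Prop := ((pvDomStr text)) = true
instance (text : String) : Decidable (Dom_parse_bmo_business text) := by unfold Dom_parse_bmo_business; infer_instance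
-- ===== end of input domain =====

-- B replaces A's three inner window scans per card by ONE forward scan that tracks the most
-- recent '$' line and collects the three optional fields in a single pass (objective: alternative).

-- ===== PORT A =====
-- lines = [l.strip() for l in text.split("\n") if l.strip()]  (comprehension = map + filter;
-- split? with the nonempty separator "\n" is always `some`)
def pvLines (text : String) : List String :=
  (((PySem.Str.split? text "\n").getD []).map PySem.Str.strip).filter
    (fun l => !l.toList.isEmpty)

-- the card-header test (identical source line in A and B)
def pvIsCard (line : String) : Bool :=
  (PySem.Str.isIn "BMO" line || PySem.Str.isIn "CashBack" line) &&
  (PySem.Str.isIn "Mastercard" line || PySem.Str.isIn "Visa" line) &&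
  decide (PySem.Str.len line < 80)

-- A's fee test: "Annual fee" in lines[j] or "annual fee" in lines[j].lower()
def pvFeeCondA (l : String) : Bool :=
  PySem.Str.isIn "Annual fee" l || PySem.Str.isIn "annual fee" (PySem.Str.lower l)

-- A's backward while-loop: k = start, start-1, … down to i, return first line containing '$'.
-- All indices visited satisfy i ≤ k < lines.length, so `lines.getD k.toNat ""` is Python's lines[k].
def pvBackScan (lines : List String) (i : Nat) (k : Int) : Option String :=
  if h : (i : Int) ≤ k then
    if PySem.Str.isIn "$" (lines.getD k.toNat "") then some (lines.getD k.toNat "")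
    else pvBackScan lines i (k - 1)
  else none
termination_by (k + 1 - i).toNat
decreasing_by omega

-- first fee loop: break on the first matching j, then the backward '$' scan from j-1
def pvFeeScanA (lines : List String) (i : Nat) : List Nat → Option String
  | [] => none
  | j :: rest =>
    if pvFeeCondA (lines.getD j "") then pvBackScan lines i ((j : Int) - 1)
    else pvFeeScanA lines i rest

def pvWelcomeVal (l : String) : String :=
  PySem.Str.strip (PySem.Str.replace l "Welcome offer:" "")

-- second loop: break on the first "Welcome offer:" line
def pvWelcomeScanA (lines : List String) : List Nat → Option String
  | [] => none
  | j :: rest =>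
    if PySem.Str.isIn "Welcome offer:" (lines.getD j "") then
      some (pvWelcomeVal (lines.getD j ""))
    else pvWelcomeScanA lines rest

-- third loop: break on the first "On purchases" line with j > 0
def pvInterestScanA (lines : List String) : List Nat → Option String
  | [] => none
  | j :: rest =>
    if PySem.Str.isIn "On purchases" (lines.getD j "") && decide (0 < j) then
      some (lines.getD (j - 1) "")
    else pvInterestScanA lines rest

-- one card: dict {"name":…, "type":…} plus the conditional inserts from the three loops
-- (List.range' i (m - i) = Python's range(i, m) for i ≤ m; every j < lines.length so getD = lines[j])
def pvCardA (lines : List String) (i : Nat) (line : String) : List (String × String) :=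
  let n := lines.length
  let card : PySem.Dict String String := PySem.Dict.ofList [("name", line), ("type", "business")]
  let card := match pvFeeScanA lines i (List.range' i (min (i + 20) n - i)) with
    | some v => card.insert "annual_fee" v
    | none => card
  let card := match pvWelcomeScanA lines (List.range' i (min (i + 15) n - i)) with
    | some v => card.insert "welcome_bonus" v
    | none => card
  let card := match pvInterestScanA lines (List.range' i (min (i + 15) n - i)) with
    | some v => card.insert "interest_purchases" v
    | none => card
  card.items

-- for i, line in enumerate(lines): …  (index loop; lines.getD i "" = lines[i] since i < length)
def parse_bmo_business (text : String) : List (List (String × String)) :=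
  let lines := pvLines text
  (List.range lines.length).foldl
    (fun cards i =>
      if pvIsCard (lines.getD i "") then cards ++ [pvCardA lines i (lines.getD i "")]
      else cards) []

-- ===== PORT B =====
-- B's fee test: "annual fee" in lj.lower()
def pvFeeCondB (l : String) : Bool := PySem.Str.isIn "annual fee" (PySem.Str.lower l)

-- one step of B's single scan, fee/done/last_dollar component
def pvStepFee (lines : List String) (st : Option String × Bool × Option String) (j : Nat) :
    Option String × Bool × Option String :=
  let lj := lines.getD j ""
  let (fee, done, ld) := st
  let (fee, done) := if !done && pvFeeCondB lj then (ld, true) else (fee, done)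
  let ld := if PySem.Str.isIn "$" lj then some lj else ld
  (fee, done, ld)

-- bonus component: only inside the 15-line window, set once
def pvStepBonus (lines : List String) (i : Nat) (b : Option String) (j : Nat) : Option String :=
  if decide (j < i + 15) && b.isNone && PySem.Str.isIn "Welcome offer:" (lines.getD j "") then
    some (pvWelcomeVal (lines.getD j ""))
  else b

-- interest component: only inside the 15-line window, j > 0, set once
def pvStepInterest (lines : List String) (i : Nat) (it : Option String) (j : Nat) : Option String :=
  if decide (j < i + 15) && it.isNone &&
      (PySem.Str.isIn "On purchases" (lines.getD j "") && decide (0 < j)) then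
    some (lines.getD (j - 1) "")
  else it

-- one card, B-style: a single fold over range(i, min(i+20, n)), then assemble the dict
def pvCardB (lines : List String) (i : Nat) (line : String) : List (String × String) :=
  let n := lines.length
  let res := (List.range' i (min (i + 20) n - i)).foldl
    (fun st j =>
      (pvStepFee lines st.1 j, pvStepBonus lines i st.2.1 j, pvStepInterest lines i st.2.2 j))
    ((none, false, none), none, none)
  let fee := res.1.1
  let bonus := res.2.1
  let interest := res.2.2
  let card : PySem.Dict String String := PySem.Dict.ofList [("name", line), ("type", "business")]
  let card := match fee with
    | some v => card.insert "annual_fee" v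
    | none => card
  let card := match bonus with
    | some v => card.insert "welcome_bonus" v
    | none => card
  let card := match interest with
    | some v => card.insert "interest_purchases" v
    | none => card
  card.items

def parse_bmo_business_alt (text : String) : List (List (String × String)) :=
  let lines := pvLines text
  (List.range lines.length).foldl
    (fun cards i =>
      if pvIsCard (lines.getD i "") then cards ++ [pvCardB lines i (lines.getD i "")]
      else cards) []

-- ===== PRECONDITION & SPEC =====
def Spec_parse_bmo_business (text : String) (out : List (List (String × String))) : Prop := out = parse_bmo_business_alt text
instance (text : String) (out : List (List (String × String))) : Decidable (Spec_parse_bmo_business text out) := by unfold Spec_parse_bmo_business; infer_instance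

-- ===== CLAIM (what is proved, stated in full; the proofs are below) =====
def Claim_equal_parse_bmo_business : Prop := ∀ (text : String), Dom_parse_bmo_business text → Spec_parse_bmo_business text (parse_bmo_business text)

-- ===== LEMMAS AND PROOFS =====

-- A's two-clause fee test equals B's single lowered one
theorem pvFeeCond_eq (l : String) : pvFeeCondA l = pvFeeCondB l := by
  unfold pvFeeCondA pvFeeCondB
  cases h : PySem.Str.isIn "Annual fee" l
  · simp
  · rw [Bool.true_or]
    symm
    rw [PySem.Str.isIn_iff_infix] at h
    rw [PySem.Str.isIn_iff_infix, PySem.Str.toList_lower, PySem.Chars.lower]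
    have hmap := List.IsInfix.map PySem.Chars.lowerChar h
    have e : List.map PySem.Chars.lowerChar "Annual fee".toList = "annual fee".toList := by decide
    rw [e] at hmap
    exact hmap

-- once the done flag is set, the fee component of B's scan never changes again
theorem pvFee_done (lines : List String) (js : List Nat)
    (st : Option String × Bool × Option String) (hst : st.2.1 = true) :
    (js.foldl (pvStepFee lines) st).1 = st.1 := by
  induction js generalizing st with
  | nil => rfl
  | cons j rest ih =>
    obtain ⟨f, d, l⟩ := st
    cases hst
    simpa [pvStepFee] using ih (st := (f, true, _)) rfl

-- the base of A's backward scan: nothing below i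
theorem pvBackScan_base (lines : List String) (i : Nat) :
    pvBackScan lines i ((i : Int) - 1) = none := by
  rw [pvBackScan]
  simp

-- one unfolding of A's backward scan at an in-range index
theorem pvBackScan_step (lines : List String) (i j : Nat) (hij : i ≤ j) :
    pvBackScan lines i (j : Int) =
      (if PySem.Str.isIn "$" (lines.getD j "") then some (lines.getD j "")
       else pvBackScan lines i ((j : Int) - 1)) := by
  rw [pvBackScan]
  have h : (i : Int) ≤ (j : Int) := by exact_mod_cast hij
  simp [h]

-- MAIN fee invariant: B's forward scan with last_dollar = A's first-match-then-backward scan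
theorem pvFee_inv (lines : List String) (i : Nat) (c : Nat) :
    ∀ (j : Nat), i ≤ j →
    ((List.range' j c).foldl (pvStepFee lines)
        (none, false, pvBackScan lines i ((j : Int) - 1))).1
      = pvFeeScanA lines i (List.range' j c) := by
  induction c with
  | zero => intro j _; simp [pvFeeScanA]
  | succ c ih =>
    intro j hij
    rw [List.range'_succ, List.foldl_cons]
    have harg : ((j + 1 : Nat) : Int) - 1 = (j : Int) := by push_cast; ring
    cases hc : pvFeeCondB (lines.getD j "") with
    | true =>
      have hstep : pvStepFee lines (none, false, pvBackScan lines i ((j : Int) - 1)) j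
          = (pvBackScan lines i ((j : Int) - 1), true,
             if PySem.Str.isIn "$" (lines.getD j "") then some (lines.getD j "")
             else pvBackScan lines i ((j : Int) - 1)) := by
        simp only [pvStepFee, Bool.not_false, Bool.true_and, hc, if_true]
      rw [hstep, pvFee_done lines _ _ rfl]
      simp only [pvFeeScanA, pvFeeCond_eq, hc, if_true]
    | false =>
      have hstep : pvStepFee lines (none, false, pvBackScan lines i ((j : Int) - 1)) j
          = (none, false, pvBackScan lines i (((j + 1 : Nat) : Int) - 1)) := by
        simp only [pvStepFee, Bool.not_false, Bool.true_and, hc, if_false, Bool.false_eq_true,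
          harg, ← pvBackScan_step lines i j hij]
      rw [hstep, ih (j + 1) (by omega)]
      simp only [pvFeeScanA, pvFeeCond_eq, hc, Bool.false_eq_true, if_false]

-- B's guarded once-only bonus fold = A's break-on-first-match welcome scan on the guarded indices
theorem pvBonus_inv (lines : List String) (i : Nat) (js : List Nat) :
    ∀ b0 : Option String,
    js.foldl (pvStepBonus lines i) b0
      = (match b0 with
         | some x => some x
         | none => pvWelcomeScanA lines (js.filter (fun j => decide (j < i + 15)))) := by
  induction js with
  | nil => intro b0; cases b0 <;> simp [pvWelcomeScanA]
  | cons j rest ih =>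
    intro b0
    cases b0 with
    | some x => simp [pvStepBonus, ih]
    | none =>
      by_cases hj : j < i + 15
      · cases hp : PySem.Str.isIn "Welcome offer:" (lines.getD j "") with
        | true =>
          simp at hp
          simp [hj, pvStepBonus, hp, ih, pvWelcomeScanA]
        | false =>
          simp at hp
          simp [hj, pvStepBonus, hp, ih, pvWelcomeScanA]
      · simp [hj, pvStepBonus, ih]

-- B's guarded once-only interest fold = A's break-on-first-match interest scan on the guarded indices
theorem pvInterest_inv (lines : List String) (i : Nat) (js : List Nat) :
    ∀ b0 : Option String,
    js.foldl (pvStepInterest lines i) b0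
      = (match b0 with
         | some x => some x
         | none => pvInterestScanA lines (js.filter (fun j => decide (j < i + 15)))) := by
  induction js with
  | nil => intro b0; cases b0 <;> simp [pvInterestScanA]
  | cons j rest ih =>
    intro b0
    cases b0 with
    | some x => simp [pvStepInterest, ih]
    | none =>
      by_cases hj : j < i + 15
      · cases hp : (PySem.Str.isIn "On purchases" (lines.getD j "") && decide (0 < j)) with
        | true =>
          simp at hp
          simp [hj, pvStepInterest, hp, ih, pvInterestScanA]
        | false =>
          simp at hp
          simp [hj, pvStepInterest, ih, pvInterestScanA]
          split <;> simp_all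
      · simp [hj, pvStepInterest, ih]

-- the guarded indices of the 20-window are exactly an initial range
theorem pvFilter_range' (m : Nat) :
    ∀ (c j : Nat), (List.range' j c).filter (fun x => decide (x < m))
      = List.range' j (min c (m - j)) := by
  intro c
  induction c with
  | zero => intro j; simp
  | succ c ih =>
    intro j
    rw [List.range'_succ, List.filter_cons]
    by_cases hj : j < m
    · have hmin : min (c + 1) (m - j) = min c (m - (j + 1)) + 1 := by omega
      simp only [hj, decide_true, if_true, ih (j + 1), hmin, List.range'_succ]
    · have h0 : min c (m - (j + 1)) = 0 := by omega
      have h1 : min (c + 1) (m - j) = 0 := by omega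
      simp [hj, ih (j + 1), h0, h1]

-- the per-card results agree
theorem pvCard_eq (lines : List String) (i : Nat) (line : String) :
    pvCardA lines i line = pvCardB lines i line := by
  unfold pvCardA pvCardB
  dsimp only
  rw [PySem.List.foldl_prod_mk (f := pvStepFee lines)
    (g := fun s e => (pvStepBonus lines i s.1 e, pvStepInterest lines i s.2 e))]
  rw [PySem.List.foldl_prod_mk (f := pvStepBonus lines i) (g := pvStepInterest lines i)]
  have hfee := pvFee_inv lines i (min (i + 20) lines.length - i) i le_rfl
  rw [pvBackScan_base] at hfee
  have hb := pvBonus_inv lines i (List.range' i (min (i + 20) lines.length - i)) none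
  have hi := pvInterest_inv lines i (List.range' i (min (i + 20) lines.length - i)) none
  have hmin : min (min (i + 20) lines.length - i) (i + 15 - i) = min (i + 15) lines.length - i := by
    omega
  rw [pvFilter_range', hmin] at hb hi
  simp only [hfee, hb, hi]

-- the two ports agree
theorem pvPorts_eq (text : String) : parse_bmo_business text = parse_bmo_business_alt text := by
  unfold parse_bmo_business parse_bmo_business_alt
  exact PySem.List.foldl_congr_mem _ _ _ _ (fun acc x _ => by rw [pvCard_eq])

-- ===== VERDICT (by name: the statement is the Claim_ definition above) =====
theorem parse_bmo_business_spec : Claim_equal_parse_bmo_business := by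
  intro text _
  show parse_bmo_business text = parse_bmo_business_alt text
  exact pvPorts_eq text
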